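-- pv_equiv track=rewrite | github.com/aesbube/vi | first_midterm_exercises/ex10/snake.py | SvrtiLevo
-- ===== SOURCE A (Python) =====
-- def SvrtiLevo(snake_body, snake_orientation, red_apples, green_apples):
--     head_coordinates = snake_body[-1]
--     if snake_orientation == 'down':
--         if head_coordinates[0] + 1 < 10 and (head_coordinates[0] + 1, head_coordinates[1]) not in red_apples and (
--                 head_coordinates[0] + 1, head_coordinates[1]) not in snake_body:
--             snake_body = list(snake_body)
--             snake_body.append((head_coordinates[0] + 1, head_coordinates[1]))
--
--             if (head_coordinates[0] + 1, head_coordinates[1]) in green_apples: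
--                 green_apples = list(green_apples)
--                 green_apples = [x for x in green_apples if x not in snake_body]
--                 green_apples = tuple(green_apples)
--             else:
--                 snake_body = snake_body[1:]
--             snake_body = tuple(snake_body)
--             snake_orientation = 'right'
--     elif snake_orientation == 'up':
--         if head_coordinates[0] - 1 >= 0 and (head_coordinates[0] - 1, head_coordinates[1]) not in red_apples and (
--                 head_coordinates[0] - 1, head_coordinates[1]) not in snake_body:
--             snake_body = list(snake_body)
--             snake_body.append((head_coordinates[0] - 1, head_coordinates[1]))
--
--             if (head_coordinates[0] - 1, head_coordinates[1]) in green_apples: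
--                 green_apples = list(green_apples)
--                 green_apples = [x for x in green_apples if x not in snake_body]
--                 green_apples = tuple(green_apples)
--             else:
--                 snake_body = snake_body[1:]
--             snake_body = tuple(snake_body)
--             snake_orientation = 'left'
--
--     elif snake_orientation == 'left':
--         if head_coordinates[1] - 1 >= 0 and (head_coordinates[0], head_coordinates[1] - 1) not in red_apples and (
--                 head_coordinates[0], head_coordinates[1] - 1) not in snake_body:
--             snake_body = list(snake_body)
--             snake_body.append((head_coordinates[0], head_coordinates[1] - 1))
--
--             if (head_coordinates[0], head_coordinates[1] - 1) in green_apples: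
--                 green_apples = list(green_apples)
--                 green_apples = [x for x in green_apples if x not in snake_body]
--                 green_apples = tuple(green_apples)
--             else:
--                 snake_body = snake_body[1:]
--             snake_body = tuple(snake_body)
--             snake_orientation = 'down'
--
--     elif snake_orientation == 'right':
--         if head_coordinates[1] + 1 < 10 and (head_coordinates[0], head_coordinates[1] + 1) not in red_apples and (
--                 head_coordinates[0], head_coordinates[1] + 1) not in snake_body:
--             snake_body = list(snake_body)
--             snake_body.append((head_coordinates[0], head_coordinates[1] + 1))
--
--             if (head_coordinates[0], head_coordinates[1] + 1) in green_apples: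
--                 green_apples = list(green_apples)
--                 green_apples = [x for x in green_apples if x not in snake_body]
--                 green_apples = tuple(green_apples)
--             else:
--                 snake_body = snake_body[1:]
--             snake_body = tuple(snake_body)
--             snake_orientation = 'up'
--
--     return snake_body, snake_orientation, green_apples
-- ===== SOURCE B (Python) =====
-- # B: symmetry reduction -- rotate the 10x10 board so the current orientation
-- # becomes 'down', perform ONE canonical step, rotate everything back.
--
-- def _rot(p):
--     return (9 - p[1], p[0])
--
--
-- def _rotk(p, k):
--     for _ in range(k):
--         p = _rot(p)
--     return p
--
--
-- QUARTERS = {'down': 0, 'left': 1, 'up': 2, 'right': 3}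
-- NAME = {(1, 0): 'down', (-1, 0): 'up', (0, -1): 'left', (0, 1): 'right'}
--
--
-- def SvrtiLevo(snake_body, snake_orientation, red_apples, green_apples):
--     k = QUARTERS.get(snake_orientation)
--     if k is None:
--         return snake_body, snake_orientation, green_apples
--     j = (4 - k) % 4
--     body = [_rotk(p, k) for p in snake_body]
--     r, c = body[-1]
--     target = (r + 1, c)
--     if r + 1 < 10 and target not in [_rotk(p, k) for p in red_apples] and target not in body:
--         body.append(target)
--         green = [_rotk(p, k) for p in green_apples]
--         if target in green:
--             green = [x for x in green if x not in body]
--         else: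
--             body = body[1:]
--         origin = _rotk((0, 0), j)
--         tip = _rotk((0, 1), j)
--         new_orientation = NAME[(tip[0] - origin[0], tip[1] - origin[1])]
--         return tuple(_rotk(p, j) for p in body), new_orientation, tuple(_rotk(p, j) for p in green)
--     return snake_body, snake_orientation, green_apples
-- ===== Notes on version B (the rewrite author's own statement) =====
-- stated objective: alternative
-- what changed: Replaces A's four duplicated per-orientation branches by symmetry reduction: rotate the 10x10 board by quarter turns so the current orientation becomes 'down', perform one canonical step (bounds/apple/body tests, grow or slide), then rotate body, apples and the direction vector back.
import Mathlib
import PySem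

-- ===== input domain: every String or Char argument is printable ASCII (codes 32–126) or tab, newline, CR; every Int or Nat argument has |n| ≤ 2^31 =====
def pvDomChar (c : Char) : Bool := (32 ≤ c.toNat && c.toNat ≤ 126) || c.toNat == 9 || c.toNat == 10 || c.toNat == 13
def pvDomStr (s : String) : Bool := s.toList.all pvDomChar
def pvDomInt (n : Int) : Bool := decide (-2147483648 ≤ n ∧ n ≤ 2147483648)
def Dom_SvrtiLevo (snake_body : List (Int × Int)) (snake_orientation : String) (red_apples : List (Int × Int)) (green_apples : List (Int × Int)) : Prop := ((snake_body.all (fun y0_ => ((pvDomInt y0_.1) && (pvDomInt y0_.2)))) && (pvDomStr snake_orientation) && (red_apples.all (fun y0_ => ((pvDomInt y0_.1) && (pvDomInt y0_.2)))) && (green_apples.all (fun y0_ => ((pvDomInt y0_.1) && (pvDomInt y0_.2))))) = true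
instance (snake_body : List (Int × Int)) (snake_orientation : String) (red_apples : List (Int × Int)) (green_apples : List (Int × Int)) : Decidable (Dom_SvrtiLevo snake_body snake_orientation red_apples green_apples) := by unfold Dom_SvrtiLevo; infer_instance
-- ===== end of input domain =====

-- B replaces A's four duplicated orientation branches by symmetry reduction: rotate the board so the
-- orientation becomes 'down', do one canonical step, rotate back (alternative decomposition, same cost).

-- ===== PORT A =====
def SvrtiLevo (snake_body : List (Int × Int)) (snake_orientation : String) (red_apples : List (Int × Int)) (green_apples : List (Int × Int)) : (List (Int × Int)) × String × (List (Int × Int)) :=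
  match PySem.List.pyGet? snake_body (-1) with
  | none => (snake_body, snake_orientation, green_apples)   -- IndexError: excluded by Pre_
  | some head =>
    if snake_orientation = "down" then
      if head.1 + 1 < 10 ∧ (head.1 + 1, head.2) ∉ red_apples ∧ (head.1 + 1, head.2) ∉ snake_body then
        let body1 := snake_body ++ [(head.1 + 1, head.2)]
        if (head.1 + 1, head.2) ∈ green_apples then
          (body1, "right", green_apples.filter (fun x => decide (x ∉ body1)))
        else
          (PySem.List.slice body1 (some 1) none, "right", green_apples)
      else (snake_body, snake_orientation, green_apples)
    else if snake_orientation = "up" then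
      if head.1 - 1 ≥ 0 ∧ (head.1 - 1, head.2) ∉ red_apples ∧ (head.1 - 1, head.2) ∉ snake_body then
        let body1 := snake_body ++ [(head.1 - 1, head.2)]
        if (head.1 - 1, head.2) ∈ green_apples then
          (body1, "left", green_apples.filter (fun x => decide (x ∉ body1)))
        else
          (PySem.List.slice body1 (some 1) none, "left", green_apples)
      else (snake_body, snake_orientation, green_apples)
    else if snake_orientation = "left" then
      if head.2 - 1 ≥ 0 ∧ (head.1, head.2 - 1) ∉ red_apples ∧ (head.1, head.2 - 1) ∉ snake_body then
        let body1 := snake_body ++ [(head.1, head.2 - 1)]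
        if (head.1, head.2 - 1) ∈ green_apples then
          (body1, "down", green_apples.filter (fun x => decide (x ∉ body1)))
        else
          (PySem.List.slice body1 (some 1) none, "down", green_apples)
      else (snake_body, snake_orientation, green_apples)
    else if snake_orientation = "right" then
      if head.2 + 1 < 10 ∧ (head.1, head.2 + 1) ∉ red_apples ∧ (head.1, head.2 + 1) ∉ snake_body then
        let body1 := snake_body ++ [(head.1, head.2 + 1)]
        if (head.1, head.2 + 1) ∈ green_apples then
          (body1, "up", green_apples.filter (fun x => decide (x ∉ body1)))
        else
          (PySem.List.slice body1 (some 1) none, "up", green_apples)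
      else (snake_body, snake_orientation, green_apples)
    else (snake_body, snake_orientation, green_apples)

-- ===== PORT B =====
-- quarter-turn of the 10x10 board
def pvRot (p : Int × Int) : Int × Int := (9 - p.2, p.1)

-- _rotk: apply pvRot k times
def pvRotK (p : Int × Int) : Nat → Int × Int
  | 0 => p
  | Nat.succ k => pvRotK (pvRot p) k

def pvQuarters : PySem.Dict String Nat :=
  PySem.Dict.ofList [("down", 0), ("left", 1), ("up", 2), ("right", 3)]

def pvName : PySem.Dict (Int × Int) String :=
  PySem.Dict.ofList [((1, 0), "down"), ((-1, 0), "up"), ((0, -1), "left"), ((0, 1), "right")]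

def SvrtiLevo_alt (snake_body : List (Int × Int)) (snake_orientation : String) (red_apples : List (Int × Int)) (green_apples : List (Int × Int)) : (List (Int × Int)) × String × (List (Int × Int)) :=
  match PySem.Dict.get? pvQuarters snake_orientation with
  | none => (snake_body, snake_orientation, green_apples)
  | some k =>
    let j := (4 - k) % 4
    let body := snake_body.map (fun p => pvRotK p k)
    match PySem.List.pyGet? body (-1) with
    | none => (snake_body, snake_orientation, green_apples)   -- IndexError: excluded by Pre_
    | some rc =>
      let target : Int × Int := (rc.1 + 1, rc.2)
      if rc.1 + 1 < 10 ∧ target ∉ red_apples.map (fun p => pvRotK p k) ∧ target ∉ body then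
        let body1 := body ++ [target]
        let green1 := green_apples.map (fun p => pvRotK p k)
        let origin := pvRotK (0, 0) j
        let tip := pvRotK (0, 1) j
        -- NAME[...]: the key is always one of the four unit vectors, so Python's [] never raises
        let no := (PySem.Dict.get? pvName (tip.1 - origin.1, tip.2 - origin.2)).getD ""
        if target ∈ green1 then
          (body1.map (fun p => pvRotK p j), no,
           (green1.filter (fun x => decide (x ∉ body1))).map (fun p => pvRotK p j))
        else
          ((PySem.List.slice body1 (some 1) none).map (fun p => pvRotK p j), no,
           green1.map (fun p => pvRotK p j))
      else (snake_body, snake_orientation, green_apples)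

-- ===== PRECONDITION & SPEC =====
-- Pre_ excludes only the empty snake body, on which Python A raises IndexError at snake_body[-1].
def Pre_SvrtiLevo (snake_body : List (Int × Int)) (snake_orientation : String) (red_apples : List (Int × Int)) (green_apples : List (Int × Int)) : Prop := snake_body ≠ []
instance (snake_body : List (Int × Int)) (snake_orientation : String) (red_apples : List (Int × Int)) (green_apples : List (Int × Int)) : Decidable (Pre_SvrtiLevo snake_body snake_orientation red_apples green_apples) := by unfold Pre_SvrtiLevo; infer_instance

def pvWitness_SvrtiLevo : (List (Int × Int)) × String × (List (Int × Int)) × (List (Int × Int)) := ([(4, 4), (4, 5)], "right", [(9, 9)], [(4, 6)])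

def Spec_SvrtiLevo (snake_body : List (Int × Int)) (snake_orientation : String) (red_apples : List (Int × Int)) (green_apples : List (Int × Int)) (out : (List (Int × Int)) × String × (List (Int × Int))) : Prop := out = SvrtiLevo_alt snake_body snake_orientation red_apples green_apples
instance (snake_body : List (Int × Int)) (snake_orientation : String) (red_apples : List (Int × Int)) (green_apples : List (Int × Int)) (out : (List (Int × Int)) × String × (List (Int × Int))) : Decidable (Spec_SvrtiLevo snake_body snake_orientation red_apples green_apples out) := by unfold Spec_SvrtiLevo; infer_instance

-- ===== CLAIM (what is proved, stated in full; the proofs are below) =====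
def Claim_equal_SvrtiLevo : Prop := ∀ (snake_body : List (Int × Int)) (snake_orientation : String) (red_apples : List (Int × Int)) (green_apples : List (Int × Int)), Dom_SvrtiLevo snake_body snake_orientation red_apples green_apples → Pre_SvrtiLevo snake_body snake_orientation red_apples green_apples → Spec_SvrtiLevo snake_body snake_orientation red_apples green_apples (SvrtiLevo snake_body snake_orientation red_apples green_apples)

-- ===== LEMMAS AND PROOFS =====

theorem mem_map_inv (f g : Int × Int → Int × Int) (hgf : ∀ p, g (f p) = p) (hfg : ∀ p, f (g p) = p)
    (l : List (Int × Int)) (x : Int × Int) : x ∈ l.map f ↔ g x ∈ l := by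
  simp only [List.mem_map]
  constructor
  · rintro ⟨a, ha, rfl⟩; rw [hgf]; exact ha
  · intro hx; exact ⟨g x, hx, hfg x⟩

theorem map_g_f (f g : Int × Int → Int × Int) (hgf : ∀ p, g (f p) = p)
    (l : List (Int × Int)) : (l.map f).map g = l := by
  induction l with
  | nil => rfl
  | cons a t ih => simp [hgf, ih]

theorem filter_map_inv (f g : Int × Int → Int × Int) (hgf : ∀ p, g (f p) = p) (hfg : ∀ p, f (g p) = p)
    (gr B : List (Int × Int)) :
    (((gr.map f).filter (fun x => decide (x ∉ B.map f))).map g) = gr.filter (fun x => decide (x ∉ B)) := by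
  induction gr with
  | nil => rfl
  | cons a t ih =>
    simp only [List.map_cons, List.filter_cons]
    have hmem : (f a ∈ B.map f) ↔ (a ∈ B) := by rw [mem_map_inv f g hgf hfg, hgf]
    by_cases hm : a ∈ B
    · rw [if_neg (by rw [decide_eq_true_eq]; exact fun h => h (hmem.mpr hm)),
          if_neg (by rw [decide_eq_true_eq]; exact fun h => h hm), ih]
    · rw [if_pos (by rw [decide_eq_true_eq]; exact fun h => hm (hmem.mp h)),
          if_pos (by rw [decide_eq_true_eq]; exact hm), List.map_cons, hgf, ih]

-- B's canonical step under a grid bijection (f, g inverse to each other) equals the direct step.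
theorem alt_branch_eq (f g : Int × Int → Int × Int)
    (hgf : ∀ p, g (f p) = p) (hfg : ∀ p, f (g p) = p)
    (body red green : List (Int × Int)) (h : Int × Int) (hlast : body.getLast? = some h)
    (sb0 : List (Int × Int)) (o0 no : String) :
    (match PySem.List.pyGet? (body.map f) (-1) with
     | none => (sb0, o0, green)
     | some rc =>
       if rc.1 + 1 < 10 ∧ (rc.1 + 1, rc.2) ∉ red.map f ∧ (rc.1 + 1, rc.2) ∉ body.map f then
         if (rc.1 + 1, rc.2) ∈ green.map f then
           ((body.map f ++ [(rc.1 + 1, rc.2)]).map g, no,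
            ((green.map f).filter (fun x => decide (x ∉ body.map f ++ [(rc.1 + 1, rc.2)]))).map g)
         else
           ((PySem.List.slice (body.map f ++ [(rc.1 + 1, rc.2)]) (some 1) none).map g, no,
            (green.map f).map g)
       else (sb0, o0, green))
    =
    (if (f h).1 + 1 < 10 ∧ g ((f h).1 + 1, (f h).2) ∉ red ∧ g ((f h).1 + 1, (f h).2) ∉ body then
       if g ((f h).1 + 1, (f h).2) ∈ green then
         (body ++ [g ((f h).1 + 1, (f h).2)], no,
          green.filter (fun x => decide (x ∉ body ++ [g ((f h).1 + 1, (f h).2)])))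
       else
         (PySem.List.slice (body ++ [g ((f h).1 + 1, (f h).2)]) (some 1) none, no, green)
     else (sb0, o0, green)) := by
  have hApp : body.map f ++ [((f h).1 + 1, (f h).2)] = (body ++ [g ((f h).1 + 1, (f h).2)]).map f := by
    rw [List.map_append]; simp [hfg]
  rw [PySem.List.pyGet?_neg_one, List.getLast?_map, hlast]
  simp only [Option.map_some]
  rw [hApp]
  have hC : ((f h).1 + 1 < 10 ∧ ((f h).1 + 1, (f h).2) ∉ red.map f ∧ ((f h).1 + 1, (f h).2) ∉ body.map f)
      ↔ ((f h).1 + 1 < 10 ∧ g ((f h).1 + 1, (f h).2) ∉ red ∧ g ((f h).1 + 1, (f h).2) ∉ body) := by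
    rw [mem_map_inv f g hgf hfg red, mem_map_inv f g hgf hfg body]
  by_cases hc : ((f h).1 + 1 < 10 ∧ g ((f h).1 + 1, (f h).2) ∉ red ∧ g ((f h).1 + 1, (f h).2) ∉ body)
  · rw [if_pos (hC.mpr hc), if_pos hc]
    by_cases hg : g ((f h).1 + 1, (f h).2) ∈ green
    · rw [if_pos ((mem_map_inv f g hgf hfg green _).mpr hg), if_pos hg,
          map_g_f f g hgf, filter_map_inv f g hgf hfg]
    · rw [if_neg (fun hx => hg ((mem_map_inv f g hgf hfg green _).mp hx)), if_neg hg,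
          PySem.List.slice_from_one, PySem.List.slice_from_one, ← List.map_tail, map_g_f f g hgf,
          map_g_f f g hgf]
  · rw [if_neg (fun hx => hc (hC.mp hx)), if_neg hc]

theorem rotk0 (p : Int × Int) : pvRotK p 0 = p := rfl
theorem rotk1 (p : Int × Int) : pvRotK p 1 = (9 - p.2, p.1) := by cases p; rfl
theorem rotk2 (p : Int × Int) : pvRotK p 2 = (9 - p.1, 9 - p.2) := by cases p; rfl
theorem rotk3 (p : Int × Int) : pvRotK p 3 = (p.2, 9 - p.1) := by
  cases p with | mk a b => show ((9:Int) - (9 - b), 9 - a) = (b, 9 - a); simp [Prod.ext_iff] <;> omega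

theorem rot00 (p : Int × Int) : pvRotK (pvRotK p 0) 0 = p := rfl
theorem rot13 (p : Int × Int) : pvRotK (pvRotK p 1) 3 = p := by
  cases p with | mk a b => simp [rotk1, rotk3, Prod.ext_iff] <;> omega
theorem rot31 (p : Int × Int) : pvRotK (pvRotK p 3) 1 = p := by
  cases p with | mk a b => simp [rotk1, rotk3, Prod.ext_iff] <;> omega
theorem rot22 (p : Int × Int) : pvRotK (pvRotK p 2) 2 = p := by
  cases p with | mk a b => simp [rotk2, Prod.ext_iff] <;> omega

theorem pvQuarters_items : pvQuarters.items = [("down", 0), ("left", 1), ("up", 2), ("right", 3)] := by decide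

theorem pvQuarters_none (o : String) (h1 : o ≠ "down") (h2 : o ≠ "up") (h3 : o ≠ "left") (h4 : o ≠ "right") :
    PySem.Dict.get? pvQuarters o = none := by
  simp [PySem.Dict.get?, pvQuarters_items]
  exact ⟨Ne.symm h1, Ne.symm h3, Ne.symm h2, Ne.symm h4⟩

-- ===== VERDICT (by name: the statement is the Claim_ definition above) =====
theorem SvrtiLevo_spec : Claim_equal_SvrtiLevo := by
  intro body orient red green _ hpre
  obtain ⟨h, hlast⟩ : ∃ x, body.getLast? = some x := by
    cases e : body.getLast? with
    | none => exact absurd (List.getLast?_eq_none_iff.mp e) hpre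
    | some x => exact ⟨x, rfl⟩
  unfold Spec_SvrtiLevo SvrtiLevo
  rw [PySem.List.pyGet?_neg_one, hlast]
  by_cases h1 : orient = "down"
  · subst h1
    refine Eq.trans ?_ (Eq.symm (alt_branch_eq (fun p => pvRotK p 0) (fun p => pvRotK p 0)
      rot00 rot00 body red green h hlast body "down" "right"))
    simp only [rotk0]
    rw [if_pos trivial]
    rfl
  · by_cases h2 : orient = "up"
    · subst h2
      refine Eq.trans ?_ (Eq.symm (alt_branch_eq (fun p => pvRotK p 2) (fun p => pvRotK p 2)
        rot22 rot22 body red green h hlast body "up" "left"))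
      have e2 : pvRotK ((pvRotK h 2).1 + 1, (pvRotK h 2).2) 2 = (h.1 - 1, h.2) := by
        cases h with | mk a b => simp [rotk2, Prod.ext_iff] <;> omega
      have e3 : ((pvRotK h 2).1 + 1 < 10) = (h.1 - 1 ≥ 0) := propext (by
        cases h with | mk a b => simp [rotk2] <;> omega)
      simp only [e2, e3, if_neg (show ¬("up" : String) = "down" by decide)]
      rw [if_pos trivial]
    · by_cases h3 : orient = "left"
      · subst h3
        refine Eq.trans ?_ (Eq.symm (alt_branch_eq (fun p => pvRotK p 1) (fun p => pvRotK p 3)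
          rot13 rot31 body red green h hlast body "left" "down"))
        have e2 : pvRotK ((pvRotK h 1).1 + 1, (pvRotK h 1).2) 3 = (h.1, h.2 - 1) := by
          cases h with | mk a b => simp [rotk1, rotk3, Prod.ext_iff] <;> omega
        have e3 : ((pvRotK h 1).1 + 1 < 10) = (h.2 - 1 ≥ 0) := propext (by
          cases h with | mk a b => simp [rotk1] <;> omega)
        simp only [e2, e3, if_neg (show ¬("left" : String) = "down" by decide),
          if_neg (show ¬("left" : String) = "up" by decide)]
        rw [if_pos trivial]
      · by_cases h4 : orient = "right"
        · subst h4
          refine Eq.trans ?_ (Eq.symm (alt_branch_eq (fun p => pvRotK p 3) (fun p => pvRotK p 1)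
            rot31 rot13 body red green h hlast body "right" "up"))
          have e2 : pvRotK ((pvRotK h 3).1 + 1, (pvRotK h 3).2) 1 = (h.1, h.2 + 1) := by
            cases h with | mk a b => simp [rotk1, rotk3, Prod.ext_iff] <;> omega
          have e3 : ((pvRotK h 3).1 + 1 < 10) = (h.2 + 1 < 10) := propext (by
            cases h with | mk a b => simp [rotk3] <;> omega)
          simp only [e2, e3, if_neg (show ¬("right" : String) = "down" by decide),
            if_neg (show ¬("right" : String) = "up" by decide),
            if_neg (show ¬("right" : String) = "left" by decide)]
          rw [if_pos trivial]
        · unfold SvrtiLevo_alt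
          rw [pvQuarters_none orient h1 h2 h3 h4]
          simp [h1, h2, h3, h4]
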